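-- pv_equiv track=rewrite | github.com/marknarain/root-calculator-python | bignumber.py | cnv
-- ===== SOURCE A (Python) =====
-- def cnv(x):
--     x = int(x)
--     positiveX = x
--
--     if x < 0:
--         positiveX = positiveX * (-1)
--
--     output = [int(i) for i in str(positiveX)]
--     if x >= 0:
--         output.insert(0,1)
--     else:
--         output.insert(0,-1)
--
--     return(output)
-- ===== SOURCE B (Python) =====
-- def cnv(x):
--     n = int(x)
--     sign = 1 if n >= 0 else -1
--     m = abs(n)
--     if m == 0:
--         digits = [0]
--     else:
--         digits = []
--         while m:
--             digits.append(m % 10)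
--             m //= 10
--         digits.reverse()
--     return [sign] + digits
-- ===== Notes on version B (the rewrite author's own statement) =====
-- stated objective: alternative
-- what changed: Replaces A's str()+per-character int() comprehension with arithmetic digit extraction (repeated %10 and //10, collected LSB-first and reversed), with abs() and an explicit zero case.
import Mathlib
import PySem

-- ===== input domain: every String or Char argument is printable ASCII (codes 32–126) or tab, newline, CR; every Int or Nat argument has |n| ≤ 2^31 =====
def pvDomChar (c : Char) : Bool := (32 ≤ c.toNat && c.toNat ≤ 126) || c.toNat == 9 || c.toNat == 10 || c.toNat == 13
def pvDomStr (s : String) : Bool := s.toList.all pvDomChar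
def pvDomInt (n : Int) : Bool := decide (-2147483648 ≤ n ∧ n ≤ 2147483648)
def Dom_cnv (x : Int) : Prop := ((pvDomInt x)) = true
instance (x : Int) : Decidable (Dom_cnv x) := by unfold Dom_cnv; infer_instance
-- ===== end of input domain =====

-- B replaces A's str()+per-character int() with arithmetic digit extraction (%10, //10, reverse); alternative of equal cost.


-- ===== PORT A =====
-- int(i) for a one-character digit string i; exact there (always `some` on digits, so getD's default is never used)
def cnvDigitVal (c : Char) : Int := (PySem.Int.ofStr? (String.ofList [c])).getD 0

def cnv (x : Int) : List Int :=
  -- x = int(x) is the identity on an int argument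
  let positiveX := if x < 0 then x * (-1) else x
  let output := (PySem.Int.toStr positiveX).toList.map cnvDigitVal
  if x ≥ 0 then PySem.List.insert output 0 1 else PySem.List.insert output 0 (-1)

-- ===== PORT B =====
-- the `while m: digits.append(m % 10); m //= 10` loop (m ≥ 0 here, so Nat division is exact)
def cnvLoop (m : Nat) (digits : List Int) : List Int :=
  if m = 0 then digits else cnvLoop (m / 10) (digits ++ [((m % 10 : Nat) : Int)])
decreasing_by exact Nat.div_lt_self (Nat.pos_of_ne_zero (by assumption)) (by norm_num)

def cnv_alt (x : Int) : List Int :=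
  let sign : Int := if x ≥ 0 then 1 else -1
  let m := x.natAbs
  let digits := if m = 0 then [(0 : Int)] else (cnvLoop m []).reverse
  sign :: digits

-- ===== PRECONDITION & SPEC =====
def Spec_cnv (x : Int) (out : List Int) : Prop := out = cnv_alt x
instance (x : Int) (out : List Int) : Decidable (Spec_cnv x out) := by unfold Spec_cnv; infer_instance

-- ===== CLAIM (what is proved, stated in full; the proofs are below) =====
def Claim_equal_cnv : Prop := ∀ (x : Int), Dom_cnv x → Spec_cnv x (cnv x)

-- ===== LEMMAS AND PROOFS =====

theorem cnvDigitVal_digitChar (r : Nat) (h : r < 10) :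
    cnvDigitVal (Nat.digitChar r) = (r : Int) := by
  interval_cases r <;> decide

-- B's loop produces Nat.digits 10 m (LSB first) appended to the accumulator
theorem cnvLoop_eq (m : Nat) : ∀ acc : List Int,
    cnvLoop m acc = acc ++ (Nat.digits 10 m).map (fun d => (d : Int)) := by
  induction m using Nat.strong_induction_on with
  | _ m ih =>
    intro acc
    rw [cnvLoop]
    by_cases h : m = 0
    · simp [h]
    · simp only [h, if_false]
      rw [ih (m / 10) (Nat.div_lt_self (Nat.pos_of_ne_zero h) (by norm_num))]
      rw [Nat.digits_def' (by norm_num : 1 < 10) (Nat.pos_of_ne_zero h)]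
      simp

-- A's string, mapped through int(), gives the digits MSB first (positive case)
theorem toDigitsCore_map (n : Nat) : ∀ (f : Nat) (acc : List Char), n < f → 0 < n →
    (Nat.toDigitsCore 10 f n acc).map cnvDigitVal =
      ((Nat.digits 10 n).map (fun d => (d : Int))).reverse ++ acc.map cnvDigitVal := by
  induction n using Nat.strong_induction_on with
  | _ n ih =>
    intro f acc hf hn
    match f with
    | 0 => omega
    | f + 1 =>
      rw [Nat.toDigitsCore]
      rw [Nat.digits_def' (by norm_num : 1 < 10) hn]
      by_cases h : n / 10 = 0
      · have h10 : n < 10 := by omega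
        simp [h, List.map_cons,
          cnvDigitVal_digitChar (n % 10) (Nat.mod_lt _ (by norm_num))]
      · simp only [h, if_false]
        have hlt : n / 10 < n := Nat.div_lt_self hn (by norm_num)
        rw [ih (n / 10) hlt f (Nat.digitChar (n % 10) :: acc) (by omega)
          (Nat.pos_of_ne_zero h)]
        simp [cnvDigitVal_digitChar (n % 10) (Nat.mod_lt _ (by norm_num))]

theorem cnv_eq_alt (x : Int) : cnv x = cnv_alt x := by
  simp only [cnv, cnv_alt]
  have hpos : (if x < 0 then x * (-1) else x) = (x.natAbs : Int) := by
    split_ifs with h <;> omega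
  rw [hpos, PySem.Int.toList_toStr]
  have habs : ¬ ((x.natAbs : Int) < 0) := by omega
  have htoNat : ((x.natAbs : Int)).toNat = x.natAbs := Int.toNat_natCast _
  simp only [PySem.Int.toChars, habs, if_false, htoNat]
  by_cases h0 : x.natAbs = 0
  · simp [h0, Nat.toDigits, Nat.toDigitsCore, PySem.List.insert_zero, cnvDigitVal]
    split_ifs with h1 <;> first | rfl | omega
  · rw [Nat.toDigits,
      toDigitsCore_map x.natAbs (x.natAbs + 1) [] (Nat.lt_succ_self _)
        (Nat.pos_of_ne_zero h0),
      cnvLoop_eq x.natAbs []]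
    simp only [h0, if_false, List.map_nil, List.append_nil, List.nil_append]
    split_ifs with h1 <;> first | simp [PySem.List.insert_zero] | omega

-- ===== VERDICT (by name: the statement is the Claim_ definition above) =====
theorem cnv_spec : Claim_equal_cnv := by
  intro x _
  exact cnv_eq_alt x
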